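-- pv_equiv track=rewrite | github.com/ImranZafar28/CodeSignal-Arcade-Intro | Eruption of Light/isBeautifulString.py | solution
-- ===== SOURCE A (Python) =====
-- def solution(inputString):
--     import string
--     letters = string.ascii_lowercase
--     count = [0 for x in letters]
--     for i in range(len(letters)):
--         for j in range(len(inputString)):
--             if letters[i] == inputString[j]:
--                 count[i] += 1
--     for x in range(len(count)-1):
--         if count[x] < count[x+1]:
--             return False
--     return True
-- ===== SOURCE B (Python) =====
-- def solution(inputString):
--     import string
--     from collections import Counter
--     tally = Counter(inputString)
--     counts = [tally[c] for c in string.ascii_lowercase]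
--     return counts == sorted(counts, reverse=True)
-- ===== Notes on version B (the rewrite author's own statement) =====
-- stated objective: faster
-- what changed: Replaces the 26xN nested counting loops and the adjacent-pair scan with a single-pass Counter tally plus a compare-with-descending-sort monotonicity test.
import Mathlib
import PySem

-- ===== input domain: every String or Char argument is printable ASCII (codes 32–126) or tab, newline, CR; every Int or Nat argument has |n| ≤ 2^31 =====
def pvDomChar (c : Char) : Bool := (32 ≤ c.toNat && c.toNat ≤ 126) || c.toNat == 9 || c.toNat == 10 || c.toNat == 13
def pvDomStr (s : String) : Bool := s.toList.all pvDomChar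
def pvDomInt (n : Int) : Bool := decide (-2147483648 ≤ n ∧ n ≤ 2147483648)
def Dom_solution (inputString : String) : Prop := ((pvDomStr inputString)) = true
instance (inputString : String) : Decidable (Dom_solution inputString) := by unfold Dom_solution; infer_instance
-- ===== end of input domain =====

-- B replaces A's 26×n nested counting loops and adjacent-pair scan by a one-pass
-- Counter tally and a compare-with-descending-sort test (constant-factor faster).

-- ===== PORT A =====
-- string.ascii_lowercase
def lettersA : List Char := "abcdefghijklmnopqrstuvwxyz".toList

def solution (inputString : String) : Bool :=
  let s := inputString.toList
  -- count = [0 for x in letters]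
  let count0 : List Int := lettersA.map (fun _ => (0 : Int))
  -- nested 'for i in range(len(letters)): for j in range(len(inputString)):';
  -- indices produced by range(len(..)) are always in range, so the Python
  -- indexing letters[i], inputString[j], count[i] is ported as getD/set
  -- (the default is never consulted)
  let count := (List.range lettersA.length).foldl
    (fun count i =>
      (List.range s.length).foldl
        (fun count j =>
          if lettersA.getD i ' ' == s.getD j ' ' then
            count.set i (count.getD i 0 + 1)
          else count)
        count)
    count0
  -- for x in range(len(count)-1): if count[x] < count[x+1]: return False
  (List.range (count.length - 1)).all
    (fun x => !decide (count.getD x 0 < count.getD (x + 1) 0))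

-- ===== PORT B =====
def lettersB : List Char := "abcdefghijklmnopqrstuvwxyz".toList

def solution_alt (inputString : String) : Bool :=
  -- tally = Counter(inputString)
  let tally := PySem.Dict.counter inputString.toList
  -- counts = [tally[c] for c in string.ascii_lowercase]  (Counter lookup defaults to 0)
  let counts : List Int := lettersB.map (fun c => tally.getD c 0)
  -- counts == sorted(counts, reverse=True)
  counts == PySem.List.sorted counts (fun x => x) true

-- ===== PRECONDITION & SPEC =====
def Spec_solution (inputString : String) (out : Bool) : Prop := out = solution_alt inputString
instance (inputString : String) (out : Bool) : Decidable (Spec_solution inputString out) := by unfold Spec_solution; infer_instance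

-- ===== CLAIM (what is proved, stated in full; the proofs are below) =====
def Claim_equal_solution : Prop := ∀ (inputString : String), Dom_solution inputString → Spec_solution inputString (solution inputString)

-- ===== LEMMAS AND PROOFS =====

-- a fold over range(len l) reading l.getD j is a fold over l itself
theorem foldl_range_getD {α β : Type} (l : List α) (d : α) (g : β → α → β) (init : β) :
    (List.range l.length).foldl (fun acc j => g acc (l.getD j d)) init = l.foldl g init := by
  induction l generalizing init with
  | nil => rfl
  | cons x t ih =>
      simp only [List.length_cons, List.range_succ_eq_map, List.foldl_cons, List.foldl_map,
        List.getD_cons_zero, List.getD_cons_succ]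
      exact ih (g init x)

-- the inner j-loop of A adds (count of c in s) at position i
theorem inner_loop (s : List Char) (c : Char) :
    ∀ (cnt : List Int) (i : Nat), i < cnt.length →
      s.foldl (fun cnt ch => if c == ch then cnt.set i (cnt.getD i 0 + 1) else cnt) cnt
        = cnt.set i (cnt.getD i 0 + s.count c) := by
  induction s with
  | nil =>
      intro cnt i hi
      simp only [List.foldl_nil, List.count_nil, Nat.cast_zero, add_zero,
        List.getD_eq_getElem _ _ hi, List.set_getElem_self]
  | cons ch t ih =>
      intro cnt i hi
      by_cases h : c = ch
      · subst h
        simp only [List.foldl_cons, BEq.rfl, if_pos]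
        rw [ih _ i (by simpa using hi)]
        rw [List.set_set]
        have hg : (cnt.set i (cnt.getD i 0 + 1)).getD i 0 = cnt.getD i 0 + 1 := by
          rw [List.getD_eq_getElem _ _ (by simpa using hi)]
          simp [hi]
        rw [hg, List.count_cons]
        simp [add_assoc, add_comm]
      · have hb : (c == ch) = false := by simp [h]
        simp only [List.foldl_cons, hb, Bool.false_eq_true, if_neg, not_false_iff]
        rw [ih _ i hi]
        rw [List.count_cons, if_neg (by simp [Ne.symm h] : ¬ ((ch == c) = true)), add_zero]

-- the outer i-loop: pointwise description of the count array
theorem outer_loop (f : Nat → Int) :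
    ∀ (n : Nat) (cnt : List Int),
      ((List.range n).foldl (fun c i => c.set i (c.getD i 0 + f i)) cnt).length = cnt.length ∧
      ∀ j, j < cnt.length →
        ((List.range n).foldl (fun c i => c.set i (c.getD i 0 + f i)) cnt).getD j 0
          = if j < n then cnt.getD j 0 + f j else cnt.getD j 0 := by
  intro n
  induction n with
  | zero => intro cnt; simp
  | succ n ih =>
      intro cnt
      obtain ⟨hlen, hget⟩ := ih cnt
      rw [List.range_succ, List.foldl_append]
      set r := (List.range n).foldl (fun c i => c.set i (c.getD i 0 + f i)) cnt with hr
      simp only [List.foldl_cons, List.foldl_nil]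
      refine ⟨by simp [hlen], ?_⟩
      intro j hj
      have hjr : j < r.length := by rw [hlen]; exact hj
      rw [List.getD_eq_getElem _ _ (by simpa using hjr), List.getElem_set]
      by_cases hjn : n = j
      · subst hjn
        rw [if_pos rfl, if_pos (by omega)]
        rw [hget _ hj, if_neg (by omega)]
      · rw [if_neg hjn, ← List.getD_eq_getElem r 0 hjr, hget j hj]
        by_cases h2 : j < n
        · rw [if_pos h2, if_pos (by omega)]
        · rw [if_neg h2, if_neg (by omega)]

-- A's count array equals the per-letter count list
theorem countA_eq (s : List Char) :
    ((List.range lettersA.length).foldl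
      (fun count i =>
        (List.range s.length).foldl
          (fun count j =>
            if lettersA.getD i ' ' == s.getD j ' ' then
              count.set i (count.getD i 0 + 1)
            else count)
          count)
      (lettersA.map (fun _ => (0 : Int))))
    = lettersA.map (fun c => (s.count c : Int)) := by
  have hlen26 : lettersA.length = 26 := by decide
  have hstep : ∀ (cnt : List Int) (i : Nat), i < 26 → cnt.length = 26 →
      (List.range s.length).foldl
        (fun count j =>
          if lettersA.getD i ' ' == s.getD j ' ' then
            count.set i (count.getD i 0 + 1)
          else count) cnt
      = cnt.set i (cnt.getD i 0 + (s.count (lettersA.getD i ' ') : Int)) := by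
    intro cnt i hi hlen
    rw [foldl_range_getD s ' '
        (fun (cnt : List Int) (ch : Char) =>
          if lettersA.getD i ' ' == ch then cnt.set i (cnt.getD i 0 + 1) else cnt)]
    exact inner_loop s (lettersA.getD i ' ') cnt i (by omega)
  -- replace the inner loop by the abstract step, maintaining the length invariant
  have key : ∀ (m : Nat) (cnt : List Int), m ≤ 26 → cnt.length = 26 →
      (List.range m).foldl
        (fun count i =>
          (List.range s.length).foldl
            (fun count j =>
              if lettersA.getD i ' ' == s.getD j ' ' then
                count.set i (count.getD i 0 + 1)
              else count)
            count) cnt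
      = (List.range m).foldl
          (fun c i => c.set i (c.getD i 0 + (s.count (lettersA.getD i ' ') : Int))) cnt := by
    intro m
    induction m with
    | zero => intro cnt _ _; rfl
    | succ m ih =>
        intro cnt hm hlen
        rw [List.range_succ, List.foldl_append, List.foldl_append, ih cnt (by omega) hlen]
        simp only [List.foldl_cons, List.foldl_nil]
        have hl := (outer_loop (fun i => (s.count (lettersA.getD i ' ') : Int)) m cnt).1
        exact hstep _ m (by omega) (by rw [hl, hlen])
  rw [hlen26, key 26 _ (le_refl _) (by simp [hlen26])]
  obtain ⟨hlen, hget⟩ := outer_loop (fun i => (s.count (lettersA.getD i ' ') : Int)) 26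
      (lettersA.map (fun _ => (0 : Int)))
  apply List.ext_getElem
  · rw [hlen]; simp
  · intro j h1 h2
    have hj : j < 26 := by simpa [hlen26] using h2
    rw [← List.getD_eq_getElem _ 0 h1]
    rw [hget j (by simp [hlen26, hj]), if_pos hj]
    have h0 : (lettersA.map (fun _ => (0 : Int))).getD j 0 = 0 := by
      rw [List.getD_eq_getElem _ _ (by simp [hlen26, hj])]; simp
    rw [h0, zero_add, List.getElem_map]
    rw [List.getD_eq_getElem lettersA ' ' (by simp [hlen26, hj] : j < lettersA.length)]

-- Python's sorted(l, reverse=True) on ints is sorted(l, key = negation)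
theorem sorted_rev_eq_neg (l : List Int) :
    PySem.List.sorted l (fun x => x) true = PySem.List.sorted l (fun x : Int => -x) false := by
  rw [PySem.List.sorted_rev_eq_foldl_insertBy, PySem.List.sorted_eq_foldl_insertBy]
  have h : (fun a b : Int => decide (b < a)) = (fun a b : Int => decide (-a < -b)) := by
    funext a b; rw [decide_eq_decide]; omega
  rw [h]

-- nonincreasing ↔ equal to the descending sort
theorem pairwise_iff_sorted_rev (l : List Int) :
    List.Pairwise (fun a b : Int => b ≤ a) l ↔ l = PySem.List.sorted l (fun x => x) true := by
  rw [sorted_rev_eq_neg]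
  constructor
  · intro h
    exact PySem.List.eq_of_perm_of_pairwise_le_of_injective (fun x : Int => -x)
      neg_injective (PySem.List.sorted_perm l (fun x : Int => -x) false).symm
      (h.imp (fun hab => neg_le_neg hab))
      (PySem.List.sorted_pairwise l (fun x : Int => -x))
  · intro h
    rw [h]
    exact (PySem.List.sorted_pairwise l (fun x : Int => -x)).imp
      (fun hab => le_of_neg_le_neg hab)

-- A's adjacent-pair scan computes exactly "l equals its descending sort"
theorem scan_eq_sorted_check (l : List Int) :
    ((List.range (l.length - 1)).all
      (fun x => !decide (l.getD x 0 < l.getD (x + 1) 0)))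
    = (l == PySem.List.sorted l (fun x => x) true) := by
  have hchain : List.IsChain (fun a b : Int => b ≤ a) l ↔
      ∀ i, i + 1 < l.length → l.getD (i + 1) 0 ≤ l.getD i 0 := by
    rw [List.isChain_iff_getElem]
    constructor
    · intro h i hi
      rw [List.getD_eq_getElem _ _ hi, List.getD_eq_getElem _ _ (by omega)]
      exact h i hi
    · intro h i hi
      have := h i hi
      rwa [List.getD_eq_getElem _ _ hi, List.getD_eq_getElem _ _ (by omega)] at this
  have hpair : List.IsChain (fun a b : Int => b ≤ a) l ↔
      List.Pairwise (fun a b : Int => b ≤ a) l :=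
    @List.isChain_iff_pairwise _ _ _ ⟨fun hab hbc => le_trans hbc hab⟩
  by_cases hmono : List.Pairwise (fun a b : Int => b ≤ a) l
  · have h1 : (l == PySem.List.sorted l (fun x => x) true) = true :=
      beq_iff_eq.mpr ((pairwise_iff_sorted_rev l).mp hmono)
    rw [h1, List.all_eq_true]
    intro x hx
    rw [List.mem_range] at hx
    have h1x : x + 1 < l.length := by omega
    have hle := hchain.mp (hpair.mpr hmono) x h1x
    rw [decide_eq_false (not_lt.mpr hle)]
    rfl
  · have h1 : (l == PySem.List.sorted l (fun x => x) true) = false := by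
      simp only [beq_eq_false_iff_ne, ne_eq]
      intro heq; exact hmono ((pairwise_iff_sorted_rev l).mpr heq)
    rw [h1]
    apply Bool.eq_false_iff.mpr
    intro hall
    rw [List.all_eq_true] at hall
    apply hmono
    apply hpair.mp
    apply hchain.mpr
    intro i hi
    have := hall i (List.mem_range.mpr (by omega))
    simpa [not_lt] using this

-- ===== VERDICT (by name: the statement is the Claim_ definition above) =====
theorem solution_spec : Claim_equal_solution := by
  intro inputString _
  unfold Spec_solution solution solution_alt
  dsimp only
  rw [countA_eq inputString.toList]
  have hBA : lettersB = lettersA := rfl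
  have hc : (lettersB.map fun c => (PySem.Dict.counter inputString.toList).getD c 0)
      = lettersA.map (fun c => (inputString.toList.count c : Int)) := by
    rw [hBA]
    exact List.map_congr_left (fun c _ => PySem.Dict.getD_counter inputString.toList c)
  rw [hc]
  exact scan_eq_sorted_check _
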